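-- pv_equiv track=rewrite | github.com/dimagi/commcare-hq | scripts/purge-platform-pkgs.py | purge_packages
-- ===== SOURCE A (Python) =====
-- from collections import deque
--
-- def purge_packages(lines, packages):
--     """Iterates over a collection of requirements `lines`, yielding all lines
--     except those matching `packages`.
--
--     :param lines: iterable of requirement file lines
--     :param packages: dictionary of packages to purge
--
--     To run tests:
--     $ ./scripts/purge-platform-pkgs.py --test
--
--     >>> unwanted = {'dep': 'parent'}
--     >>> list(purge_packages([], unwanted))
--     []
--     >>> list(purge_packages(['django==3.2.1', ' # via -r base.in'], unwanted))
--     ['django==3.2.1', ' # via -r base.in']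
--     >>> list(purge_packages(['dep==1.2.3', ' # via parent'], unwanted))
--     []
--     >>> list(purge_packages(['dep==1.2.3', ' # via parent-sub'], unwanted))
--     ['dep==1.2.3', ' # via parent-sub']
--     >>> list(purge_packages(['dep==1.2.3', ' # via django'], unwanted))
--     ['dep==1.2.3', ' # via django']
--     >>> list(purge_packages(['django', ' # via -r base.in', 'dep==1.2.3', ' # via parent'], unwanted))
--     ['django', ' # via -r base.in']
--     >>> list(purge_packages(['dep==1.2.3', ' # via parent', 'django', ' # via -r base.in'], unwanted))
--     ['django', ' # via -r base.in']
--     """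
--     stack = deque(lines)
--     while stack:
--         line = stack.popleft()
--         name, delim, tail = line.partition("=")
--         if delim and name in packages and stack:
--             next_line = stack.popleft()  # pop the "via" line
--             if next_line.strip() == f"# via {packages[name]}":
--                 continue  # skip both lines
--             stack.insert(0, next_line)  # nope, put it back
--         yield line
-- ===== SOURCE B (Python) =====
-- def purge_packages(lines, packages):
--     """Single forward pass with a one-element pending buffer instead of a
--     deque with pushback."""
--     pending = None  # (held package line, expected via-string)
--     for line in lines:
--         if pending is not None:
--             held, via = pending
--             pending = None
--             if line.strip() == via:
--                 continue  # drop both the held line and its via line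
--             yield held
--         name, delim, _tail = line.partition("=")
--         if delim and name in packages:
--             pending = (line, f"# via {packages[name]}")
--         else:
--             yield line
--     if pending is not None:
--         yield pending[0]
-- ===== Notes on version B (the rewrite author's own statement) =====
-- stated objective: simpler
-- what changed: Replaced the deque with popleft/insert-back (which reprocesses a put-back line) by a single forward pass over the lines keeping a one-element pending buffer (the last seen package line and its expected via-string), flushed after the loop.
import Mathlib
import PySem

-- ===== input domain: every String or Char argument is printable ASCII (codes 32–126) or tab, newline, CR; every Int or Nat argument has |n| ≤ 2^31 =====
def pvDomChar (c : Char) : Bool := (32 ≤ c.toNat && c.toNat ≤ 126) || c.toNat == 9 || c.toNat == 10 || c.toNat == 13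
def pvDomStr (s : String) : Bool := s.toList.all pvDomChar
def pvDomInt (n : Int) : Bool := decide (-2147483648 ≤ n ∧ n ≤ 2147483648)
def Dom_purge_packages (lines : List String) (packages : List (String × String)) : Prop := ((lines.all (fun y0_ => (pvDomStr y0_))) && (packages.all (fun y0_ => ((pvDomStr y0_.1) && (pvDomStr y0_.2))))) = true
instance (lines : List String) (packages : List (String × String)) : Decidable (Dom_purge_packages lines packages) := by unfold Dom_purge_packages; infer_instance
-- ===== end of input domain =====

-- B replaces A's deque-with-pushback by a forward single pass with a one-element
-- pending buffer; same output, simpler control flow. (Both Pythons are generators;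
-- the equivalence is about the yielded sequence as a list.)

-- shared port of Python's str.partition(sep) (both Pythons call it)
def pyPartition (s sep : String) : String × String × String :=
  let i := PySem.Str.find s sep
  if i = -1 then (s, "", "")
  else (String.ofList (s.toList.take i.toNat), sep,
        String.ofList (s.toList.drop (i.toNat + sep.length)))

-- ===== PORT A =====
-- A's loop: pop a line; if it is a package line and the stack is nonempty, pop the
-- next line too; drop both if it is the matching via line, else put it back.
def purgeA (d : PySem.Dict String String) : List String → List String
  | [] => []
  | line :: stack =>
    let pr := pyPartition line "="           -- name, delim, _tail = line.partition("=")
    if pr.2.1 ≠ "" ∧ d.contains pr.1 = true ∧ stack ≠ [] then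
      match stack with
      | [] => line :: purgeA d []            -- unreachable (stack ≠ [])
      | next :: rest =>
        if PySem.Str.strip next == "# via " ++ d.getD pr.1 "" then
          purgeA d rest                      -- skip both lines
        else
          line :: purgeA d (next :: rest)    -- put next back, yield line
    else
      line :: purgeA d stack
termination_by stack => stack.length
decreasing_by all_goals (simp; try omega)

def purge_packages (lines : List String) (packages : List (String × String)) : List String :=
  purgeA (PySem.Dict.ofList packages) lines

-- ===== PORT B =====
-- B's loop: one forward pass; `pending` holds a stashed package line and its
-- expected via-string; flushed after the loop.
def loopB (d : PySem.Dict String String) (pending : Option (String × String)) :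
    List String → List String
  | [] =>
    match pending with
    | some pv => [pv.1]
    | none => []
  | line :: rest =>
    let proc : List String :=                -- process `line` with nothing pending
      let pr := pyPartition line "="         -- name, delim, _tail = line.partition("=")
      if pr.2.1 ≠ "" ∧ d.contains pr.1 = true then
        loopB d (some (line, "# via " ++ d.getD pr.1 "")) rest
      else
        line :: loopB d none rest
    match pending with
    | some pv =>
      if PySem.Str.strip line == pv.2 then loopB d none rest
      else pv.1 :: proc
    | none => proc

def purge_packages_alt (lines : List String) (packages : List (String × String)) : List String :=
  loopB (PySem.Dict.ofList packages) none lines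

-- ===== PRECONDITION & SPEC =====
def Spec_purge_packages (lines : List String) (packages : List (String × String)) (out : List String) : Prop := out = purge_packages_alt lines packages
instance (lines : List String) (packages : List (String × String)) (out : List String) : Decidable (Spec_purge_packages lines packages out) := by unfold Spec_purge_packages; infer_instance

-- ===== CLAIM (what is proved, stated in full; the proofs are below) =====
def Claim_equal_purge_packages : Prop := ∀ (lines : List String) (packages : List (String × String)), Dom_purge_packages lines packages → Spec_purge_packages lines packages (purge_packages lines packages)

-- ===== LEMMAS AND PROOFS =====

-- branch equations of the well-founded purgeA
theorem purgeA_nil (d : PySem.Dict String String) : purgeA d [] = [] := by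
  rw [purgeA.eq_def]

theorem purgeA_single (d : PySem.Dict String String) (line : String) :
    purgeA d [line] = [line] := by
  rw [purgeA.eq_def]; simp [purgeA_nil]

theorem purgeA_nonpkg (d : PySem.Dict String String) (line : String) (stack : List String)
    (h : ¬ ((pyPartition line "=").2.1 ≠ "" ∧ d.contains (pyPartition line "=").1 = true)) :
    purgeA d (line :: stack) = line :: purgeA d stack := by
  rw [purgeA.eq_def]; simp only []
  rw [if_neg (by tauto)]

theorem purgeA_pkg_match (d : PySem.Dict String String) (line next : String) (rest : List String)
    (h1 : (pyPartition line "=").2.1 ≠ "") (h2 : d.contains (pyPartition line "=").1 = true)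
    (hm : (PySem.Str.strip next == "# via " ++ d.getD (pyPartition line "=").1 "") = true) :
    purgeA d (line :: next :: rest) = purgeA d rest := by
  rw [purgeA.eq_def]; simp only []
  rw [if_pos ⟨h1, h2, by simp⟩, if_pos hm]

theorem purgeA_pkg_nomatch (d : PySem.Dict String String) (line next : String) (rest : List String)
    (h1 : (pyPartition line "=").2.1 ≠ "") (h2 : d.contains (pyPartition line "=").1 = true)
    (hm : ¬ (PySem.Str.strip next == "# via " ++ d.getD (pyPartition line "=").1 "") = true) :
    purgeA d (line :: next :: rest) = line :: purgeA d (next :: rest) := by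
  rw [purgeA.eq_def]; simp only []
  rw [if_pos ⟨h1, h2, by simp⟩, if_neg hm]

-- a pending entry is always a package line paired with its via-string
def ValidPending (d : PySem.Dict String String) (pending : Option (String × String)) : Prop :=
  ∀ pv, pending = some pv →
    (pyPartition pv.1 "=").2.1 ≠ "" ∧ d.contains (pyPartition pv.1 "=").1 = true ∧
      pv.2 = "# via " ++ d.getD (pyPartition pv.1 "=").1 ""

def prepend : Option (String × String) → List String → List String
  | none, s => s
  | some pv, s => pv.1 :: s

theorem prepend_none (s : List String) : prepend none s = s := rfl

-- loop invariant: B's state (pending, remaining stack) equals A run on pending-line :: stack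
theorem loopB_eq_purgeA (d : PySem.Dict String String) :
    ∀ (stack : List String) (pending : Option (String × String)),
      ValidPending d pending → loopB d pending stack = purgeA d (prepend pending stack) := by
  intro stack
  induction stack with
  | nil =>
    rintro (_ | ⟨p, via⟩) hv
    · rw [prepend_none, purgeA_nil]; rfl
    · rw [show prepend (some (p, via)) [] = [p] from rfl, purgeA_single]; rfl
  | cons line rest ih =>
    rintro (_ | ⟨p, via⟩) hv
    · -- nothing pending: loopB's `proc` processes line
      show (if (pyPartition line "=").2.1 ≠ "" ∧ d.contains (pyPartition line "=").1 = true then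
              loopB d (some (line, "# via " ++ d.getD (pyPartition line "=").1 "")) rest
            else line :: loopB d none rest) = purgeA d (line :: rest)
      by_cases hpkg : (pyPartition line "=").2.1 ≠ "" ∧ d.contains (pyPartition line "=").1 = true
      · rw [if_pos hpkg,
          ih (some (line, "# via " ++ d.getD (pyPartition line "=").1 ""))
            (by rintro pv ⟨rfl⟩; exact ⟨hpkg.1, hpkg.2, rfl⟩)]
        rfl
      · rw [if_neg hpkg, ih none (by rintro pv ⟨⟩), prepend_none, purgeA_nonpkg d line rest hpkg]
    · -- pending (p, via): compare line's strip with via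
      obtain ⟨h1, h2, h3⟩ := hv (p, via) rfl
      show (if PySem.Str.strip line == via then loopB d none rest
            else p ::
              (if (pyPartition line "=").2.1 ≠ "" ∧ d.contains (pyPartition line "=").1 = true then
                loopB d (some (line, "# via " ++ d.getD (pyPartition line "=").1 "")) rest
              else line :: loopB d none rest)) = purgeA d (p :: line :: rest)
      simp only at h3
      subst h3
      by_cases hm : (PySem.Str.strip line == "# via " ++ d.getD (pyPartition p "=").1 "") = true
      · rw [if_pos hm, purgeA_pkg_match d p line rest h1 h2 hm, ih none (by rintro pv ⟨⟩), prepend_none]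
      · rw [if_neg hm, purgeA_pkg_nomatch d p line rest h1 h2 hm]
        congr 1
        by_cases hpkg : (pyPartition line "=").2.1 ≠ "" ∧ d.contains (pyPartition line "=").1 = true
        · rw [if_pos hpkg,
            ih (some (line, "# via " ++ d.getD (pyPartition line "=").1 ""))
              (by rintro pv ⟨rfl⟩; exact ⟨hpkg.1, hpkg.2, rfl⟩)]
          rfl
        · rw [if_neg hpkg, ih none (by rintro pv ⟨⟩), prepend_none, purgeA_nonpkg d line rest hpkg]

-- ===== VERDICT (by name: the statement is the Claim_ definition above) =====
theorem purge_packages_spec : Claim_equal_purge_packages := by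
  intro lines packages _
  unfold Spec_purge_packages purge_packages purge_packages_alt
  exact (loopB_eq_purgeA _ lines none (by rintro pv ⟨⟩)).symm
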